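-- pv_equiv track=rewrite | github.com/x200706/AdvProgram | UVA/490/490.py | rolate
-- ===== SOURCE A (Python) =====
-- def rolate(max_len, line_num, arr):
--     # 要正確初始化新陣列避免index out of range
--     new_arr = [[] * line_num for _ in range(max_len)]
--     for i in range(line_num): # 0~1
--         for j in reversed(range(max_len)): # 25~0
--             if j >= len(arr[i]):
--                 new_arr[j].append(' ')
--             else:
--                 new_arr[j].insert(0, arr[i][j])
--     return new_arr
-- ===== SOURCE B (Python) =====
-- def rolate(max_len, line_num, arr):
--     # Build the rotated grid row by row: for each output row j, take the j-th
--     # characters of the lines in reverse line order, then pad with spaces.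
--     new_arr = []
--     for j in range(max_len):
--         chars = [arr[i][j] for i in reversed(range(line_num)) if j < len(arr[i])]
--         new_arr.append(chars + [' '] * (line_num - len(chars)))
--     return new_arr
-- ===== Notes on version B (the rewrite author's own statement) =====
-- stated objective: simpler
-- what changed: B builds the result row by row (for each output row j it collects the j-th characters of the lines in reverse line order, then pads with spaces), instead of A's transposed nested loops that scatter insert(0)/append writes across all rows for each input line.
import Mathlib
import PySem

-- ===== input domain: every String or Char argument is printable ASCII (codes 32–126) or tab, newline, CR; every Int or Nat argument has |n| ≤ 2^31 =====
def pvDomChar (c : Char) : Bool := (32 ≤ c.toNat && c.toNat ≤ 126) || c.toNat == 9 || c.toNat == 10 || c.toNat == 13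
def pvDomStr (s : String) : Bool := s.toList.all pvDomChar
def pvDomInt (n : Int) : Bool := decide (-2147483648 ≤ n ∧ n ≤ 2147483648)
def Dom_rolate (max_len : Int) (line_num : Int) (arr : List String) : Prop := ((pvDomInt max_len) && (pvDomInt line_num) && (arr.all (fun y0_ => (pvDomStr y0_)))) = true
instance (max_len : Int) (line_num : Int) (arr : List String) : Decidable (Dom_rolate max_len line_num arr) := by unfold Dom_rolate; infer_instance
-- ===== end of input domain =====

-- B builds each output row directly (j-th chars of the lines in reverse line order, then space
-- padding) instead of A's transposed nested loops that scatter insert(0)/append writes: simpler.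

-- ===== PORT A =====
-- Python chars are 1-character strings: String.ofList [c] is exact for s[j].
def rolate (max_len : Int) (line_num : Int) (arr : List String) : List (List String) :=
  -- new_arr = [[] * line_num for _ in range(max_len)]   ([] * n is [])
  (PySem.List.pyRange 0 line_num 1).foldl (fun na i =>
    ((PySem.List.pyRange 0 max_len 1).reverse).foldl (fun na j =>
      let s := (PySem.List.pyGet? arr i).getD ""   -- arr[i]; Pre_ guarantees the index is in range
      if PySem.Str.len s ≤ j then
        na.modify j.toNat (fun row => row ++ [" "])                 -- new_arr[j].append(' ')
      else
        na.modify j.toNat (fun row =>                               -- new_arr[j].insert(0, arr[i][j])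
          (((PySem.Str.pyGet? s j).map (fun c => String.ofList [c])).getD " ") :: row)) na)
    ((PySem.List.pyRange 0 max_len 1).map (fun _ => ([] : List String)))

-- ===== PORT B =====
def rolate_alt (max_len : Int) (line_num : Int) (arr : List String) : List (List String) :=
  (PySem.List.pyRange 0 max_len 1).map (fun j =>
    let chars := ((PySem.List.pyRange 0 line_num 1).reverse).filterMap (fun i =>
      let s := (PySem.List.pyGet? arr i).getD ""   -- arr[i]; Pre_ guarantees the index is in range
      if j < PySem.Str.len s then
        (PySem.Str.pyGet? s j).map (fun c => String.ofList [c])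
      else none)
    chars ++ List.replicate (line_num - chars.length).toNat " ")

-- ===== PRECONDITION & SPEC =====
-- Pre_ excludes exactly the inputs where the Python A raises IndexError (arr[i] with
-- i ≥ len(arr), reached iff line_num > len(arr) and the inner loop body runs, i.e. max_len ≥ 1).
def Pre_rolate (max_len : Int) (line_num : Int) (arr : List String) : Prop :=
  line_num ≤ arr.length ∨ max_len ≤ 0
instance (max_len : Int) (line_num : Int) (arr : List String) : Decidable (Pre_rolate max_len line_num arr) := by unfold Pre_rolate; infer_instance
def pvWitness_rolate : Int × Int × List String := (3, 2, ["ab", "c"])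

def Spec_rolate (max_len : Int) (line_num : Int) (arr : List String) (out : List (List String)) : Prop := out = rolate_alt max_len line_num arr
instance (max_len : Int) (line_num : Int) (arr : List String) (out : List (List String)) : Decidable (Spec_rolate max_len line_num arr out) := by unfold Spec_rolate; infer_instance

-- ===== CLAIM (what is proved, stated in full; the proofs are below) =====
def Claim_equal_rolate : Prop := ∀ (max_len : Int) (line_num : Int) (arr : List String), Dom_rolate max_len line_num arr → Pre_rolate max_len line_num arr → Spec_rolate max_len line_num arr (rolate max_len line_num arr)

-- ===== LEMMAS AND PROOFS =====

-- The per-cell operation A performs on row j while processing line i.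
def cellOp (arr : List String) (i : Int) (j : Int) (row : List String) : List String :=
  let s := (PySem.List.pyGet? arr i).getD ""
  if PySem.Str.len s ≤ j then row ++ [" "]
  else (((PySem.Str.pyGet? s j).map (fun c => String.ofList [c])).getD " ") :: row

-- B's char extraction for row j from line i.
def cellGet (arr : List String) (i : Int) (j : Int) : Option String :=
  let s := (PySem.List.pyGet? arr i).getD ""
  if j < PySem.Str.len s then (PySem.Str.pyGet? s j).map (fun c => String.ofList [c]) else none

-- Row k after a fold of single-row modifications over distinct nonnegative indices.
lemma foldl_modify_getElem?
    (op : Int → List String → List String) (L : List Int) (na : List (List String))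
    (hnn : ∀ x ∈ L, 0 ≤ x) (hnd : L.Nodup) (k : Nat) :
    (L.foldl (fun na j => na.modify j.toNat (op j)) na)[k]? =
      if (k : Int) ∈ L then (op k) <$> na[k]? else na[k]? := by
  induction L generalizing na with
  | nil => simp
  | cons j L ih =>
    have hj : 0 ≤ j := hnn j (by simp)
    have hmem : j ∉ L := (List.nodup_cons.mp hnd).1
    rw [List.foldl_cons,
      ih _ (fun x hx => hnn x (List.mem_cons_of_mem _ hx)) (List.nodup_cons.mp hnd).2]
    by_cases hkj : (k : Int) = j
    · subst hkj
      have hkL : (k : Int) ∉ L := hmem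
      rw [if_neg hkL, if_pos (List.mem_cons_self), List.getElem?_modify]
      have ht : (k : Int).toNat = k := Int.toNat_natCast k
      rw [ht]
      cases na[k]? <;> simp
    · have hne : j.toNat ≠ k := by omega
      rw [List.getElem?_modify]
      by_cases hkL : (k : Int) ∈ L
      · rw [if_pos hkL, if_pos (List.mem_cons_of_mem _ hkL)]
        cases na[k]? <;> simp [hne]
      · rw [if_neg hkL, if_neg (by simp [hkj, hkL])]
        cases na[k]? <;> simp [hne]

-- Row k after A's inner loop over one input line i.
lemma inner_getElem? (arr : List String) (max_len i : Int)
    (na : List (List String)) (k : Nat) :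
    (((PySem.List.pyRange 0 max_len 1).reverse).foldl
        (fun na j => na.modify j.toNat (cellOp arr i j)) na)[k]? =
      if (k : Int) < max_len then cellOp arr i k <$> na[k]? else na[k]? := by
  rw [foldl_modify_getElem? (cellOp arr i) _ na
    (fun x hx => ((PySem.List.mem_pyRange_one).mp (List.mem_reverse.mp hx)).1)
    (List.nodup_reverse.mpr (PySem.List.nodup_pyRange_one 0 max_len)) k]
  have hiff : ((k : Int) ∈ (PySem.List.pyRange 0 max_len 1).reverse) ↔ (k : Int) < max_len := by
    rw [List.mem_reverse, PySem.List.mem_pyRange_one]; omega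
  rw [if_congr hiff rfl rfl]

-- Row k after A's outer loop over the lines in L.
lemma outer_getElem? (arr : List String) (max_len : Int) (L : List Int)
    (na : List (List String)) (k : Nat) :
    (L.foldl (fun na i =>
        ((PySem.List.pyRange 0 max_len 1).reverse).foldl
          (fun na j => na.modify j.toNat (cellOp arr i j)) na) na)[k]? =
      if (k : Int) < max_len then
        (fun row => L.foldl (fun row i => cellOp arr i k row) row) <$> na[k]?
      else na[k]? := by
  induction L generalizing na with
  | nil =>
    split
    · cases hna : na[k]? <;> simp [hna]
    · rfl
  | cons i L ih =>
    rw [List.foldl_cons, ih, inner_getElem?]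
    by_cases h : (k : Int) < max_len
    · simp only [if_pos h]
      cases na[k]? <;> simp
    · simp only [if_neg h]

-- A's result, row by row.
lemma rolate_getElem? (max_len line_num : Int) (arr : List String) (k : Nat) :
    (rolate max_len line_num arr)[k]? =
      if (k : Int) < max_len then
        some ((PySem.List.pyRange 0 line_num 1).foldl
          (fun row i => cellOp arr i k row) [])
      else none := by
  have hbody : rolate max_len line_num arr =
      (PySem.List.pyRange 0 line_num 1).foldl (fun na i =>
        ((PySem.List.pyRange 0 max_len 1).reverse).foldl
          (fun na j => na.modify j.toNat (cellOp arr i j)) na)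
        ((PySem.List.pyRange 0 max_len 1).map (fun _ => ([] : List String))) := by
    unfold rolate
    congr 1
    funext na i
    congr 1
    funext na j
    show (if PySem.Str.len ((PySem.List.pyGet? arr i).getD "") ≤ j then
            na.modify j.toNat (fun row => row ++ [" "])
          else na.modify j.toNat (fun row =>
            (((PySem.Str.pyGet? ((PySem.List.pyGet? arr i).getD "") j).map
              (fun c => String.ofList [c])).getD " ") :: row)) =
          na.modify j.toNat (cellOp arr i j)
    split <;> rename_i hh
    · congr 1
      funext row
      show row ++ [" "] = cellOp arr i j row
      simp only [cellOp]
      rw [if_pos hh]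
    · congr 1
      funext row
      show (((PySem.Str.pyGet? ((PySem.List.pyGet? arr i).getD "") j).map
          (fun c => String.ofList [c])).getD " ") :: row = cellOp arr i j row
      simp only [cellOp]
      rw [if_neg hh]
  have hlen : ((PySem.List.pyRange 0 max_len 1).map
      (fun _ => ([] : List String))).length = (max_len - 0).toNat := by
    simp [PySem.List.length_pyRange_one]
  have hinit : ((PySem.List.pyRange 0 max_len 1).map
      (fun _ => ([] : List String)))[k]? =
        if (k : Int) < max_len then some [] else none := by
    by_cases h : (k : Int) < max_len
    · rw [List.getElem?_eq_getElem (by rw [hlen]; omega)]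
      simp [h]
    · rw [List.getElem?_eq_none (by rw [hlen]; omega)]
      simp [h]
  rw [hbody, outer_getElem?, hinit]
  by_cases h : (k : Int) < max_len
  · simp only [if_pos h]
    rfl
  · simp only [if_neg h]

-- A's per-row loop builds exactly B's row: chars in reverse line order, then the padding.
lemma row_eq (arr : List String) (L : List Int) (k : Nat) :
    L.foldl (fun row i => cellOp arr i k row) [] =
      (L.reverse.filterMap (fun i => cellGet arr i k)) ++
        List.replicate (L.length - (L.reverse.filterMap (fun i => cellGet arr i k)).length) " " := by
  induction L using List.reverseRecOn with
  | nil => simp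
  | append_singleton L i ih =>
    rw [List.foldl_append, List.foldl_cons, List.foldl_nil, ih,
      List.reverse_append, List.reverse_singleton, List.singleton_append]
    have hle := List.length_filterMap_le (fun i => cellGet arr i (k : Int)) L.reverse
    rw [List.length_reverse] at hle
    set s := (PySem.List.pyGet? arr i).getD "" with hs
    set ch := L.reverse.filterMap (fun i => cellGet arr i (k : Int)) with hch
    by_cases h : PySem.Str.len s ≤ (k : Int)
    · have hnone : cellGet arr i (k : Int) = none := by
        simp only [cellGet]
        rw [← hs, if_neg (by omega)]
      rw [List.filterMap_cons, hnone]
      simp only [cellOp]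
      rw [← hs, if_pos h, List.append_assoc, ← List.replicate_succ']
      have hcnt : L.length - ch.length + 1 = (L ++ [i]).length - ch.length := by
        rw [List.length_append, List.length_singleton]; omega
      rw [hcnt]
    · have hlt : (k : Int) < PySem.Str.len s := by omega
      have hk : k < s.toList.length := by
        rw [PySem.Str.len_eq] at hlt; omega
      have hget : PySem.Str.pyGet? s (k : Int) = some s.toList[k] := by
        rw [PySem.Str.pyGet?_natCast, List.getElem?_eq_getElem hk]
      have hsome : cellGet arr i (k : Int) = some (String.ofList [s.toList[k]]) := by
        simp only [cellGet]
        rw [← hs, if_pos hlt, hget, Option.map_some]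
      rw [List.filterMap_cons, hsome]
      simp only [cellOp]
      rw [← hs, if_neg h, hget, Option.map_some, Option.getD_some, List.cons_append]
      have hcnt : L.length - ch.length = (L ++ [i]).length - (String.ofList [s.toList[k]] :: ch).length := by
        rw [List.length_append, List.length_singleton, List.length_cons]; omega
      rw [hcnt]

-- B's result, row by row.
lemma rolate_alt_getElem? (max_len line_num : Int) (arr : List String) (k : Nat) :
    (rolate_alt max_len line_num arr)[k]? =
      if (k : Int) < max_len then
        some ((((PySem.List.pyRange 0 line_num 1).reverse).filterMap (fun i => cellGet arr i k)) ++
          List.replicate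
            (line_num - ((((PySem.List.pyRange 0 line_num 1).reverse).filterMap (fun i => cellGet arr i k)).length : Int)).toNat " ")
      else none := by
  unfold rolate_alt
  by_cases h : (k : Int) < max_len
  · have hk : k < (PySem.List.pyRange 0 max_len 1).length := by
      rw [PySem.List.length_pyRange_one]; omega
    rw [List.getElem?_map, List.getElem?_eq_getElem hk,
      PySem.List.getElem_pyRange_one 0 max_len k hk, if_pos h, Option.map_some, zero_add]
    rfl
  · rw [List.getElem?_eq_none
      (by rw [List.length_map, PySem.List.length_pyRange_one]; omega), if_neg h]

-- ===== VERDICT (by name: the statement is the Claim_ definition above) =====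
theorem rolate_spec : Claim_equal_rolate := by
  intro max_len line_num arr _ _
  unfold Spec_rolate
  apply List.ext_getElem?
  intro k
  rw [rolate_getElem?, rolate_alt_getElem?, row_eq]
  by_cases h : (k : Int) < max_len
  · rw [if_pos h, if_pos h]
    set ch := ((PySem.List.pyRange 0 line_num 1).reverse).filterMap
      (fun i => cellGet arr i (k : Int)) with hch
    have hle : ch.length ≤ (line_num - 0).toNat := by
      rw [hch]
      have h2 := List.length_filterMap_le (fun i => cellGet arr i (k : Int))
        (PySem.List.pyRange 0 line_num 1).reverse
      rwa [List.length_reverse, PySem.List.length_pyRange_one] at h2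
    have hcnt : (PySem.List.pyRange 0 line_num 1).length - ch.length =
        (line_num - (ch.length : Int)).toNat := by
      rw [PySem.List.length_pyRange_one]; omega
    rw [hcnt]
  · rw [if_neg h, if_neg h]
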